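-- pv_equiv track=rewrite | github.com/PTIN-TerminalA/A5-PTIN | generacioDadesDDBB/volsddbb/gen_taula_ticket.py | generar_seient_ocupat
-- ===== SOURCE A (Python) =====
-- def generar_seient_ocupat(ocupats):
--     files = list(range(1, 31))  # Files de 1 a 30
--     lletres = list("ABCDEF")    # Seients A-F
--     for fila in files:
--         for lletra in lletres:
--             seient = f"{fila}{lletra}"
--             if seient not in ocupats:
--                 ocupats.add(seient)
--                 return seient
--     return None
-- ===== SOURCE B (Python) =====
-- def generar_seient_ocupat(ocupats):
--     all_seats = [f"{f}{l}" for f in range(1, 31) for l in "ABCDEF"]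
--     rank = {s: i for i, s in enumerate(all_seats)}
--     remaining = set(all_seats) - set(ocupats)
--     if not remaining:
--         return None
--     seient = min(remaining, key=rank.__getitem__)
--     ocupats.add(seient)
--     return seient
-- ===== Notes on version B (the rewrite author's own statement) =====
-- stated objective: alternative
-- what changed: Replaces A's nested first-hit scan with early return by precomputing the full seat table and a seat->position rank index once, taking the set complement all_seats - ocupats, and selecting its rank-minimal element (None if the complement is empty).
import Mathlib
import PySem

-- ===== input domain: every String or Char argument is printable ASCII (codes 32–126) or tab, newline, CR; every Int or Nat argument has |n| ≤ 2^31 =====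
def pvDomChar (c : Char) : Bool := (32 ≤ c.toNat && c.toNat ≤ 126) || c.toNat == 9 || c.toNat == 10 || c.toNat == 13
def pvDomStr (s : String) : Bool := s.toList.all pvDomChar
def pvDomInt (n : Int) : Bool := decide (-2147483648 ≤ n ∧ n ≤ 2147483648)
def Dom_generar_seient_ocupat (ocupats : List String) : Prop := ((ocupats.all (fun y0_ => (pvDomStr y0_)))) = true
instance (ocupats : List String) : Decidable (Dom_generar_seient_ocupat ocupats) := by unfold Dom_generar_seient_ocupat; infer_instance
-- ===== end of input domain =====

-- B replaces A's nested first-hit scan (early return) by: precomputed seat table + rank index,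
-- complement set all_seats - ocupats, and selection of its rank-minimal element.
-- Both Pythons mutate the argument set (ocupats.add) identically; the equivalence proved here is about the RETURN value.

-- ===== PORT A =====
-- 'for … : if hit: return' loop with early return: foldl whose accumulator, once some, is kept
def pvLoop {α β : Type} (body : α → Option β) (xs : List α) (acc : Option β) : Option β :=
  xs.foldl (fun a x => match a with | some v => some v | none => body x) acc

-- f"{fila}{lletra}" ported as String.ofList (Int.toChars fila ++ [lletra]) (exact: str(fila) with one char appended)
def generar_seient_ocupat (ocupats : List String) : Option String :=
  let files := PySem.List.pyRange 1 31 1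
  let lletres := "ABCDEF".toList
  pvLoop (fun fila =>
    pvLoop (fun lletra =>
      let seient := String.ofList (PySem.Int.toChars fila ++ [lletra])
      if seient ∈ ocupats then none else some seient) lletres none) files none

-- ===== PORT B =====
-- all_seats = [f"{f}{l}" for f in range(1, 31) for l in "ABCDEF"]
def pvAllSeats : List String :=
  (PySem.List.pyRange 1 31 1).flatMap (fun f =>
    "ABCDEF".toList.map (fun l => String.ofList (PySem.Int.toChars f ++ [l])))

-- rank = {s: i for i, s in enumerate(all_seats)}
def pvRank : PySem.Dict String Int :=
  (PySem.List.enumerate pvAllSeats 0).foldl (fun d p => d.insert p.2 p.1) PySem.Dict.empty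

-- min(remaining, key=rank.__getitem__): rank[s] ported as getD with default 0 — every element of
-- remaining is in all_seats, hence a key of rank, so the default is never used (exact);
-- the key is injective on remaining, so the minimum is independent of the set's iteration order.
def generar_seient_ocupat_alt (ocupats : List String) : Option String :=
  let remaining : PySem.Set String :=
    PySem.Set.diff (PySem.Set.ofList pvAllSeats) (PySem.Set.ofList ocupats)
  if remaining = [] then none
  else PySem.List.min? remaining (fun s => pvRank.getD s 0)

-- ===== PRECONDITION & SPEC =====
def Spec_generar_seient_ocupat (ocupats : List String) (out : Option String) : Prop := out = generar_seient_ocupat_alt ocupats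
instance (ocupats : List String) (out : Option String) : Decidable (Spec_generar_seient_ocupat ocupats out) := by unfold Spec_generar_seient_ocupat; infer_instance

-- ===== CLAIM (what is proved, stated in full; the proofs are below) =====
def Claim_equal_generar_seient_ocupat : Prop := ∀ (ocupats : List String), Dom_generar_seient_ocupat ocupats → Spec_generar_seient_ocupat ocupats (generar_seient_ocupat ocupats)

-- ===== LEMMAS AND PROOFS =====

-- A's early-return loop, once it holds some value, keeps it
theorem pv_pvLoop_some {α β : Type} (g : α → Option β) (xs : List α) (s : β) :
    pvLoop g xs (some s) = some s := by
  induction xs with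
  | nil => rfl
  | cons x t ih => simpa [pvLoop, List.foldl_cons] using ih

-- A's early-return loop from none is findSome?
theorem pv_pvLoop_eq_findSome? {α β : Type} (g : α → Option β) (xs : List α) :
    pvLoop g xs none = xs.findSome? g := by
  induction xs with
  | nil => rfl
  | cons x t ih =>
    simp only [pvLoop, List.foldl_cons, List.findSome?_cons]
    cases h : g x with
    | none => simpa [pvLoop] using ih
    | some s => simpa [h] using pv_pvLoop_some g t s

-- A's inner loop body: findSome? with an 'if occupied then continue else return' guard is find? over the seats
theorem pv_findSome?_guard {α β : Type} (P : β → Prop) [DecidablePred P] (f : α → β) (xs : List α) :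
    xs.findSome? (fun x => if P (f x) then none else some (f x))
      = (xs.map f).find? (fun y => !(decide (P y))) := by
  induction xs with
  | nil => rfl
  | cons x t ih =>
    simp only [List.findSome?_cons, List.map_cons, List.find?_cons]
    by_cases h : P (f x) <;> simp [h, ih]

-- find? over a flatMap is a findSome? of the per-block find?
theorem pv_find?_flatMap {α β : Type} (g : α → List β) (p : β → Bool) (xs : List α) :
    (xs.flatMap g).find? p = xs.findSome? (fun x => (g x).find? p) := by
  induction xs with
  | nil => rfl
  | cons x t ih =>
    simp only [List.flatMap_cons, List.find?_append, List.findSome?_cons]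
    cases h : (g x).find? p
    · simp [h, ih]
    · simp [h]

-- A computes the first seat of pvAllSeats not in ocupats
theorem pv_A_eq_find? (ocupats : List String) :
    generar_seient_ocupat ocupats
      = pvAllSeats.find? (fun s => !(decide (s ∈ ocupats))) := by
  unfold generar_seient_ocupat pvAllSeats
  rw [pv_pvLoop_eq_findSome?, pv_find?_flatMap]
  congr 1
  funext fila
  rw [pv_pvLoop_eq_findSome?]
  exact pv_findSome?_guard (fun s => s ∈ ocupats) _ _

-- min? of a list whose key is strictly increasing is its head
theorem pv_min?_pairwise_head {α : Type} (k : α → Int) (l : List α)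
    (hp : l.Pairwise (fun a b => k a < k b)) :
    PySem.List.min? l k = l.head? := by
  cases l with
  | nil => simp [PySem.List.min?_eq_none_iff]
  | cons h t =>
    cases hm : PySem.List.min? (h :: t) k with
    | none =>
      exact absurd ((PySem.List.min?_eq_none_iff _ _).mp hm) (by simp)
    | some m =>
      have hmem := PySem.List.min?_mem hm
      have hmin := PySem.List.min?_isMin hm h (List.mem_cons_self)
      rcases List.mem_cons.mp hmem with rfl | hmt
      · rfl
      · have := (List.pairwise_cons.mp hp).1 m hmt
        omega

-- rank is strictly increasing along the seat table (literal computation)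
set_option maxRecDepth 1000000 in
theorem pv_rank_pairwise :
    pvAllSeats.Pairwise (fun a b => pvRank.getD a 0 < pvRank.getD b 0) := by
  decide

-- the seat table has no duplicates, so set(all_seats) is the table itself (literal computation)
set_option maxRecDepth 100000 in
theorem pv_ofList_allSeats : PySem.Set.ofList pvAllSeats = pvAllSeats := by
  decide

-- B's remaining set is the seat table filtered by non-membership in ocupats
theorem pv_remaining_eq_filter (ocupats : List String) :
    PySem.Set.diff (PySem.Set.ofList pvAllSeats) (PySem.Set.ofList ocupats)
      = pvAllSeats.filter (fun s => !(decide (s ∈ ocupats))) := by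
  rw [PySem.Set.diff, pv_ofList_allSeats]
  apply List.filter_congr
  intro x _
  by_cases hx : x ∈ ocupats <;>
    simp [hx, PySem.Set.mem_ofList]

-- ===== VERDICT (by name: the statement is the Claim_ definition above) =====
theorem generar_seient_ocupat_spec : Claim_equal_generar_seient_ocupat := by
  intro ocupats _
  show generar_seient_ocupat ocupats = generar_seient_ocupat_alt ocupats
  rw [pv_A_eq_find?]
  unfold generar_seient_ocupat_alt
  rw [pv_remaining_eq_filter, ← List.head?_filter]
  by_cases hf : pvAllSeats.filter (fun s => !(decide (s ∈ ocupats))) = []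
  · simp [hf]
  · rw [if_neg hf,
      pv_min?_pairwise_head _ _ (pv_rank_pairwise.sublist List.filter_sublist)]
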